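-- pv_equiv track=rewrite | github.com/phucty/kgdb | kgdb/resources/db/db_deletes.py | delete_edits_prefix
-- ===== SOURCE A (Python) =====
-- from itertools import combinations
--
-- def delete_edits_prefix(key, max_edit_dis, prefix_length, min_len=1):
--     if len(key) > prefix_length:
--         key = key[:prefix_length]
--     _min_len = len(key) - max_edit_dis - 1
--     if _min_len < min_len:
--         _min_len = min_len - 1
--     combine = {
--         "".join(l) for i in range(_min_len, len(key)) for l in combinations(key, i + 1)
--     }
--     return combine
-- ===== SOURCE B (Python) =====
-- def delete_edits_prefix(key, max_edit_dis, prefix_length, min_len=1):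
--     key = key[:prefix_length]
--     n = len(key)
--     floor = n - max_edit_dis
--     if floor < min_len:
--         floor = min_len
--     result = set()
--     # frontier of (partial subsequence, remaining suffix); a partial is dropped as
--     # soon as it can no longer be extended to a string of length >= floor
--     level = [("", key)] if n >= floor else []
--     for r in range(n + 1):
--         if r >= floor:
--             for s, _ in level:
--                 result.add(s)
--         level = [(s + rest[j], rest[j + 1:]) for s, rest in level
--                  for j in range(len(rest)) if len(s) + len(rest) - j >= floor]
--     return result
-- ===== Notes on version B (the rewrite author's own statement) =====
-- stated objective: alternative
-- what changed: Replaces the per-length itertools.combinations set comprehension by a single iterative level-synchronous frontier of (partial subsequence, remaining suffix) pairs, extended one kept character at a time with branch-and-bound pruning of partials that can no longer reach the floor length, collecting the strings of every level at or above the floor.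
-- crash fix: When min_len < 0 and max_edit_dis exceeds the truncated key length, A raises ValueError (combinations with negative r); B returns the full subsequence set of the truncated key (all lengths 0..len, including the empty string). — e.g. on delete_edits_prefix("ab", 5, 10, -2): A raises ValueError, B returns ["", "a", "b", "ab"]
import Mathlib
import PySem

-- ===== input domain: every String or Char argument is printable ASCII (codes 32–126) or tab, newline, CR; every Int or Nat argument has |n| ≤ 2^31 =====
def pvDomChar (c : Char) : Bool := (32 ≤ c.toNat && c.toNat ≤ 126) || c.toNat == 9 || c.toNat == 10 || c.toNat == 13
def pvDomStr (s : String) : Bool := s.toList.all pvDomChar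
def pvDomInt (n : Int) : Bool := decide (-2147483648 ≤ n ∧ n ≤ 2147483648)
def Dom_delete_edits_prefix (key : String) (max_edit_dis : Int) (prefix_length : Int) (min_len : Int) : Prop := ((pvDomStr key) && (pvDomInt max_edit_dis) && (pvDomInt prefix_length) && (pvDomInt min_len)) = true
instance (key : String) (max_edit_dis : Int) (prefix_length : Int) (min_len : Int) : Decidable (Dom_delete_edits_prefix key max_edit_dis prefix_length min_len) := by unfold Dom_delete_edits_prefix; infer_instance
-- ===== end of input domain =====

-- B replaces the per-length itertools.combinations comprehension by one iterative frontier of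
-- (partial subsequence, remaining suffix) pairs extended level by level; equality of return values
-- is proved on Pre_ (where A does not raise ValueError).

-- ===== PORT A =====
-- Hand port of itertools.combinations(key, r) for r ≥ 0: exact — it yields the same tuples in the
-- same lexicographic-by-position order as the Python library (negative r, where Python raises
-- ValueError, is excluded by Pre_).
def combA : Nat → List Char → List (List Char)
  | 0, _ => [[]]
  | _+1, [] => []
  | r+1, x::xs => ((combA r xs).map (fun t => x :: t)) ++ combA (r+1) xs

def delete_edits_prefix (key : String) (max_edit_dis : Int) (prefix_length : Int) (min_len : Int) : List String :=
  let kl0 := key.toList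
  let kl := if (kl0.length : Int) > prefix_length then PySem.List.slice kl0 none (some prefix_length) else kl0
  let m0 : Int := (kl.length : Int) - max_edit_dis - 1
  let m1 : Int := if m0 < min_len then min_len - 1 else m0
  ((PySem.List.pyRange m1 (kl.length : Int) 1).flatMap
      (fun i => (combA (i + 1).toNat kl).map (fun t => String.ofList t))).foldl PySem.Set.add PySem.Set.empty

-- ===== PORT B =====
-- Port of Source B's inner comprehension: extend the partial subsequence s with each character of its
-- remaining suffix rest, keeping a child only if it can still reach length floor (rest[j] exists
-- for every j < len(rest), so getD is exact; rest[j+1:] is List.drop (j+1) with natural bounds).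
def extB (floor : Int) (s : String) (rest : List Char) : List (String × List Char) :=
  ((List.range rest.length).filter
      (fun j : Nat => decide (floor ≤ (s.length : Int) + (rest.length : Int) - (j : Int)))).map
    (fun j => (s.push (rest.getD j ' '), rest.drop (j + 1)))

-- one iteration of Source B's for-loop body over the state (result, level)
def stepB (floor : Int) (st : List String × List (String × List Char)) (r : Int) :
    List String × List (String × List Char) :=
  (if floor ≤ r then st.2.foldl (fun acc sp => PySem.Set.add acc sp.1) st.1 else st.1,
   st.2.flatMap (fun sp => extB floor sp.1 sp.2))

def delete_edits_prefix_alt (key : String) (max_edit_dis : Int) (prefix_length : Int) (min_len : Int) : List String :=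
  let kl := PySem.List.slice key.toList none (some prefix_length)
  let n : Int := (kl.length : Int)
  let floor0 : Int := n - max_edit_dis
  let floor : Int := if floor0 < min_len then min_len else floor0
  ((PySem.List.pyRange 0 (n + 1) 1).foldl (stepB floor)
      (PySem.Set.empty, if floor ≤ n then [("", kl)] else [])).1

-- ===== PRECONDITION & SPEC =====
-- Length of the truncated key key[:prefix_length] as A computes it (closed form on the inputs).
def pvTruncLen (key : String) (prefix_length : Int) : Int :=
  if 0 ≤ prefix_length then min (key.toList.length : Int) prefix_length
  else max ((key.toList.length : Int) + prefix_length) 0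

-- Pre_ excludes exactly the inputs where A raises ValueError (combinations with negative r):
-- min_len < 0 together with max_edit_dis exceeding the truncated key length.
def Pre_delete_edits_prefix (key : String) (max_edit_dis : Int) (prefix_length : Int) (min_len : Int) : Prop :=
  max_edit_dis ≤ pvTruncLen key prefix_length ∨ 0 ≤ min_len
instance (key : String) (max_edit_dis : Int) (prefix_length : Int) (min_len : Int) : Decidable (Pre_delete_edits_prefix key max_edit_dis prefix_length min_len) := by unfold Pre_delete_edits_prefix; infer_instance

def pvWitness_delete_edits_prefix : String × Int × Int × Int := ("abc", 1, 5, 1)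

-- When min_len < 0 and max_edit_dis exceeds the truncated key length, A raises ValueError;
-- B returns the full subsequence set of the truncated key (all lengths 0..len, including "").
def Raises_delete_edits_prefix (key : String) (max_edit_dis : Int) (prefix_length : Int) (min_len : Int) : Prop :=
  pvTruncLen key prefix_length < max_edit_dis ∧ min_len < 0
instance (key : String) (max_edit_dis : Int) (prefix_length : Int) (min_len : Int) : Decidable (Raises_delete_edits_prefix key max_edit_dis prefix_length min_len) := by unfold Raises_delete_edits_prefix; infer_instance

def pvRaiseWitness_delete_edits_prefix : String × Int × Int × Int := ("ab", 5, 10, -2)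
def pvRaiseWitnessOut_delete_edits_prefix : List String := ["", "a", "b", "ab"]

def Spec_delete_edits_prefix (key : String) (max_edit_dis : Int) (prefix_length : Int) (min_len : Int) (out : List String) : Prop := out = delete_edits_prefix_alt key max_edit_dis prefix_length min_len
instance (key : String) (max_edit_dis : Int) (prefix_length : Int) (min_len : Int) (out : List String) : Decidable (Spec_delete_edits_prefix key max_edit_dis prefix_length min_len out) := by unfold Spec_delete_edits_prefix; infer_instance

-- ===== CLAIM (what is proved, stated in full; the proofs are below) =====
def Claim_equal_delete_edits_prefix : Prop := ∀ (key : String) (max_edit_dis : Int) (prefix_length : Int) (min_len : Int), Dom_delete_edits_prefix key max_edit_dis prefix_length min_len → Pre_delete_edits_prefix key max_edit_dis prefix_length min_len → Spec_delete_edits_prefix key max_edit_dis prefix_length min_len (delete_edits_prefix key max_edit_dis prefix_length min_len)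
def Claim_raises_delete_edits_prefix : Prop := (∀ (key : String) (max_edit_dis : Int) (prefix_length : Int) (min_len : Int), Dom_delete_edits_prefix key max_edit_dis prefix_length min_len → Raises_delete_edits_prefix key max_edit_dis prefix_length min_len → ¬ Pre_delete_edits_prefix key max_edit_dis prefix_length min_len) ∧ (Dom_delete_edits_prefix (pvRaiseWitness_delete_edits_prefix.1) (pvRaiseWitness_delete_edits_prefix.2.1) (pvRaiseWitness_delete_edits_prefix.2.2.1) (pvRaiseWitness_delete_edits_prefix.2.2.2) ∧ Raises_delete_edits_prefix (pvRaiseWitness_delete_edits_prefix.1) (pvRaiseWitness_delete_edits_prefix.2.1) (pvRaiseWitness_delete_edits_prefix.2.2.1) (pvRaiseWitness_delete_edits_prefix.2.2.2) ∧ delete_edits_prefix_alt (pvRaiseWitness_delete_edits_prefix.1) (pvRaiseWitness_delete_edits_prefix.2.1) (pvRaiseWitness_delete_edits_prefix.2.2.1) (pvRaiseWitness_delete_edits_prefix.2.2.2) = pvRaiseWitnessOut_delete_edits_prefix)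

-- ===== LEMMAS AND PROOFS =====

-- combinations with remaining-suffix annotation: (chosen characters, suffix after last choice)
def combAS : Nat → List Char → List (List Char × List Char)
  | 0, l => [([], l)]
  | _+1, [] => []
  | r+1, x::xs => ((combAS r xs).map (fun p => (x :: p.1, p.2))) ++ combAS (r+1) xs

-- character-level extension, mirror of extB
def extC (c : List Char) (rest : List Char) : List (List Char × List Char) :=
  (List.range rest.length).map (fun j => (c ++ [rest.getD j ' '], rest.drop (j + 1)))

theorem combAS_fst : ∀ (l : List Char) (r : Nat), (combAS r l).map (·.1) = combA r l := by
  intro l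
  induction l with
  | nil => intro r; match r with | 0 => rfl | r+1 => rfl
  | cons x xs ih =>
    intro r
    match r with
    | 0 => rfl
    | r+1 =>
      simp only [combAS, combA, List.map_append, List.map_map, ← ih]
      rfl

theorem extC_cons (x : Char) (c rest : List Char) :
    extC (x :: c) rest = (extC c rest).map (fun q => (x :: q.1, q.2)) := by
  simp [extC, List.map_map]

theorem extC_nil_cons (x : Char) (xs : List Char) :
    extC [] (x :: xs) = ([x], xs) :: extC [] xs := by
  simp [extC, List.range_succ_eq_map, List.map_map, Function.comp]

theorem combAS_one : ∀ (l : List Char), combAS 1 l = extC [] l := by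
  intro l
  induction l with
  | nil => simp [combAS, extC]
  | cons x xs ih =>
    have h : combAS 1 (x :: xs) = ([x], xs) :: combAS 1 xs := by simp [combAS]
    rw [h, ih, extC_nil_cons]

theorem combAS_succ : ∀ (l : List Char) (r : Nat),
    combAS (r+1) l = (combAS r l).flatMap (fun p => extC p.1 p.2) := by
  intro l
  induction l with
  | nil =>
    intro r
    match r with
    | 0 => simp [combAS, extC]
    | r+1 => simp [combAS]
  | cons x xs ih =>
    intro r
    match r with
    | 0 =>
      have h : (combAS 0 (x :: xs)).flatMap (fun p => extC p.1 p.2) = extC [] (x :: xs) := by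
        simp [combAS]
      rw [h]
      exact combAS_one (x :: xs)
    | r+1 =>
      simp only [combAS, List.flatMap_append, List.flatMap_map]
      rw [ih (r+1)]
      congr 1
      have hfun : (fun p : List Char × List Char => extC (x :: p.1) p.2)
           = (fun p : List Char × List Char => (extC p.1 p.2).map (fun q => (x :: q.1, q.2))) := by
        funext p; exact extC_cons x p.1 p.2
      rw [hfun, ← List.map_flatMap, ← ih r]

theorem push_ofList (c : List Char) (ch : Char) :
    (String.ofList c).push ch = String.ofList (c ++ [ch]) :=
  String.toList_inj.mp (by simp [String.toList_push])

-- the keep-predicate of B's pruning, at character level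
def keepP (floor : Int) (p : List Char × List Char) : Bool :=
  decide (floor ≤ (p.1.length : Int) + (p.2.length : Int))

-- pruned frontier as it appears in B: surviving pairs, as strings with remaining suffixes
def annF (floor : Int) (kl : List Char) (r : Nat) : List (String × List Char) :=
  ((combAS r kl).filter (keepP floor)).map (fun p => (String.ofList p.1, p.2))

theorem extB_ofList (floor : Int) (c rest : List Char) :
    extB floor (String.ofList c) rest
      = (((extC c rest).filter (keepP floor)).map (fun p => (String.ofList p.1, p.2))) := by
  rw [extB, extC, List.filter_map]
  simp only [List.map_map]
  have hfil : (List.range rest.length).filter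
        (fun j : Nat => decide (floor ≤ ((String.ofList c).length : Int) + (rest.length : Int) - (j : Int)))
      = (List.range rest.length).filter
        ((keepP floor) ∘ (fun j => (c ++ [rest.getD j ' '], rest.drop (j + 1)))) := by
    apply List.filter_congr
    intro j hj
    rw [List.mem_range] at hj
    simp only [Function.comp_apply, keepP, String.length_ofList, List.length_append,
      List.length_cons, List.length_nil, List.length_drop]
    rw [decide_eq_decide]
    omega
  rw [hfil]
  apply List.map_congr_left
  intro j _
  simp only [Function.comp_apply]
  rw [push_ofList]

-- a pruned-away pair has no surviving children
theorem children_nil (floor : Int) (p : List Char × List Char) (hp : keepP floor p = false) :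
    (extC p.1 p.2).filter (keepP floor) = [] := by
  rw [List.filter_eq_nil_iff]
  intro q hq
  rw [extC, List.mem_map] at hq
  obtain ⟨j, hj, hq⟩ := hq
  rw [List.mem_range] at hj
  subst hq
  simp only [keepP, decide_eq_false_iff_not, not_le, List.length_append, List.length_cons,
    List.length_nil, List.length_drop, decide_eq_true_eq] at hp ⊢
  omega

-- pruning before the step loses no surviving children
theorem flatMap_filter_keep (floor : Int) (l : List (List Char × List Char)) :
    (l.filter (keepP floor)).flatMap (fun p => (extC p.1 p.2).filter (keepP floor))
      = l.flatMap (fun p => (extC p.1 p.2).filter (keepP floor)) := by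
  induction l with
  | nil => rfl
  | cons p ps ih =>
    by_cases hp : keepP floor p
    · rw [List.filter_cons_of_pos hp, List.flatMap_cons, List.flatMap_cons, ih]
    · rw [List.filter_cons_of_neg (by simpa using hp), List.flatMap_cons, ih,
        children_nil floor p (by simpa using hp), List.nil_append]

theorem annF_step (floor : Int) (kl : List Char) (r : Nat) :
    (annF floor kl r).flatMap (fun sp => extB floor sp.1 sp.2) = annF floor kl (r+1) := by
  simp only [annF, List.flatMap_map]
  have h1 : ((combAS r kl).filter (keepP floor)).flatMap
        (fun p => extB floor (String.ofList p.1) p.2)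
      = ((combAS r kl).filter (keepP floor)).flatMap
        (fun p => ((extC p.1 p.2).filter (keepP floor)).map (fun q => (String.ofList q.1, q.2))) := by
    apply List.flatMap_congr
    intro p _
    exact extB_ofList floor p.1 p.2
  rw [h1, ← List.map_flatMap, flatMap_filter_keep, ← List.filter_flatMap, ← combAS_succ]

-- every pair of combAS r has a chosen part of length r
theorem combAS_len : ∀ (l : List Char) (r : Nat), ∀ p ∈ combAS r l, p.1.length = r := by
  intro l
  induction l with
  | nil =>
    intro r p hp
    match r, hp with
    | 0, hp => rw [combAS] at hp; simp at hp; subst hp; rfl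
  | cons x xs ih =>
    intro r p hp
    match r with
    | 0 => rw [combAS] at hp; simp at hp; subst hp; rfl
    | r+1 =>
      rw [combAS, List.mem_append] at hp
      rcases hp with hp | hp
      · rw [List.mem_map] at hp
        obtain ⟨q, hq, hpq⟩ := hp
        subst hpq
        simp [ih r q hq]
      · exact ih (r+1) p hp

-- above the floor, pruning keeps the whole level
theorem annF_fst (floor : Int) (kl : List Char) (r : Nat) (hr : floor ≤ (r : Int)) :
    (annF floor kl r).map (·.1) = (combA r kl).map (fun t => String.ofList t) := by
  have hfil : (combAS r kl).filter (keepP floor) = combAS r kl := by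
    rw [List.filter_eq_self]
    intro p hp
    have := combAS_len kl r p hp
    simp only [keepP, decide_eq_true_iff]
    push_cast [this]
    omega
  rw [← combAS_fst kl r]
  simp [annF, hfil, List.map_map, Function.comp]
-- what B's loop collects: the strings of each level whose index reaches the floor
def collectB (floor : Int) : Nat → Int → List (String × List Char) → List String
  | 0, _, _ => []
  | m+1, r, fr => (if floor ≤ r then fr.map (·.1) else [])
      ++ collectB floor m (r+1) (fr.flatMap (fun sp => extB floor sp.1 sp.2))

theorem loopB (floor : Int) : ∀ (m : Nat) (r0 : Int) (acc : List String) (fr : List (String × List Char)),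
    (((List.range m).map (fun j : Nat => r0 + (j : Int))).foldl (stepB floor) (acc, fr)).1
      = (collectB floor m r0 fr).foldl PySem.Set.add acc := by
  intro m
  induction m with
  | zero => intro r0 acc fr; simp [collectB]
  | succ m ih =>
    intro r0 acc fr
    rw [List.range_succ_eq_map, List.map_cons, List.map_map, List.foldl_cons]
    have hmap : ((List.range m).map ((fun j : Nat => r0 + (j : Int)) ∘ Nat.succ))
        = (List.range m).map (fun j : Nat => (r0 + 1) + (j : Int)) := by
      apply List.map_congr_left; intro j _
      show r0 + ((Nat.succ j : Nat) : Int) = (r0 + 1) + (j : Int)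
      push_cast
      ring
    rw [hmap]
    have hstep : stepB floor (acc, fr) (r0 + ((0 : Nat) : Int))
        = (if floor ≤ r0 then (fr.map (·.1)).foldl PySem.Set.add acc else acc,
           fr.flatMap (fun sp => extB floor sp.1 sp.2)) := by
      simp [stepB, List.foldl_map]
    rw [hstep, ih, collectB, List.foldl_append]
    by_cases h : floor ≤ r0
    · rw [if_pos h, if_pos h]
    · rw [if_neg h, if_neg h]; rfl

theorem collectB_annF (kl : List Char) (floor : Int) :
    ∀ (m s : Nat), collectB floor m ((s : Nat) : Int) (annF floor kl s)
      = (List.range m).flatMap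
          (fun j => if floor ≤ ((s + j : Nat) : Int) then (combA (s + j) kl).map (fun t => String.ofList t) else []) := by
  intro m
  induction m with
  | zero => intro s; simp [collectB]
  | succ m ih =>
    intro s
    rw [collectB, annF_step]
    have hc : ((s : Nat) : Int) + 1 = (((s + 1 : Nat) : Nat) : Int) := by push_cast; ring
    rw [hc, ih (s+1), List.range_succ_eq_map, List.flatMap_cons, List.flatMap_map]
    congr 1
    · rw [show (s + 0 : Nat) = s from by omega]
      split_ifs with h
      · exact annF_fst floor kl s h
      · rfl
    · apply List.flatMap_congr
      intro j _
      show (if floor ≤ ((s + 1 + j : Nat) : Int) then (combA (s + 1 + j) kl).map (fun t => String.ofList t) else [])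
        = (if floor ≤ ((s + Nat.succ j : Nat) : Int) then (combA (s + Nat.succ j) kl).map (fun t => String.ofList t) else [])
      rw [show s + Nat.succ j = s + 1 + j from by omega]

-- A's flatMap over pyRange(c-1, N) of lengths i+1, as a filtered flatMap over 0..N
theorem Arange_eq (kl : List Char) (N : Nat) (c : Int) (hc : 0 ≤ c) :
    (PySem.List.pyRange (c - 1) ((N : Nat) : Int) 1).flatMap
        (fun i => (combA (i + 1).toNat kl).map (fun t => String.ofList t))
      = (List.range (N + 1)).flatMap
          (fun r => if c ≤ ((r : Nat) : Int) then (combA r kl).map (fun t => String.ofList t) else []) := by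
  by_cases hcn : c ≤ (N : Int)
  · have hsplit : N + 1 = c.toNat + (N + 1 - c.toNat) := by omega
    rw [hsplit, List.range_add, List.flatMap_append]
    have h1 : (List.range c.toNat).flatMap
        (fun r => if c ≤ ((r : Nat) : Int) then (combA r kl).map (fun t => String.ofList t) else []) = [] := by
      rw [List.flatMap_eq_nil_iff]
      intro r hr
      rw [List.mem_range] at hr
      rw [if_neg (by omega)]
    rw [h1, List.nil_append, List.flatMap_map]
    rw [PySem.List.pyRange_one]
    have hlen2 : (((N : Nat) : Int) - (c - 1)).toNat = N + 1 - c.toNat := by omega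
    rw [hlen2, List.flatMap_map]
    apply List.flatMap_congr
    intro k _
    show (combA ((c - 1) + (k : Int) + 1).toNat kl).map (fun t => String.ofList t)
      = if c ≤ ((c.toNat + k : Nat) : Int) then (combA (c.toNat + k) kl).map (fun t => String.ofList t) else []
    rw [if_pos (by push_cast; omega)]
    rw [show ((c - 1) + (k : Int) + 1).toNat = c.toNat + k from by omega]
  · rw [PySem.List.pyRange_one]
    have h0 : (((N : Nat) : Int) - (c - 1)).toNat = 0 := by omega
    rw [h0]
    simp only [List.range_zero, List.map_nil, List.flatMap_nil]
    symm
    rw [List.flatMap_eq_nil_iff]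
    intro r hr
    rw [List.mem_range] at hr
    rw [if_neg (by omega)]

theorem annF_zero (floor : Int) (kl : List Char) :
    annF floor kl 0 = if floor ≤ (kl.length : Int) then [("", kl)] else [] := by
  by_cases h : floor ≤ (kl.length : Int)
  · rw [if_pos h]
    have : keepP floor ([], kl) = true := by
      simp only [keepP, decide_eq_true_iff, List.length_nil]
      push_cast; omega
    simp [annF, combAS, this]
  · rw [if_neg h]
    have : keepP floor ([], kl) = false := by
      simp only [keepP, decide_eq_false_iff_not, List.length_nil, not_le]
      push_cast; omega
    simp [annF, combAS, this]

-- the core equality on the truncated key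
theorem main_eq (kl : List Char) (med ml : Int)
    (hpre : med ≤ (kl.length : Int) ∨ 0 ≤ ml) :
    ((PySem.List.pyRange (if (kl.length : Int) - med - 1 < ml then ml - 1 else (kl.length : Int) - med - 1) (kl.length : Int) 1).flatMap
        (fun i => (combA (i + 1).toNat kl).map (fun t => String.ofList t))).foldl PySem.Set.add PySem.Set.empty
    = ((PySem.List.pyRange 0 ((kl.length : Int) + 1) 1).foldl
        (stepB (if (kl.length : Int) - med < ml then ml else (kl.length : Int) - med))
        (PySem.Set.empty,
          if (if (kl.length : Int) - med < ml then ml else (kl.length : Int) - med) ≤ (kl.length : Int)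
          then [("", kl)] else [])).1 := by
  set c : Int := if (kl.length : Int) - med < ml then ml else (kl.length : Int) - med with hcdef
  have hc0 : 0 ≤ c := by rw [hcdef]; split_ifs <;> omega
  have hm1 : (if (kl.length : Int) - med - 1 < ml then ml - 1 else (kl.length : Int) - med - 1) = c - 1 := by
    rw [hcdef]; split_ifs <;> omega
  rw [hm1, Arange_eq kl kl.length c hc0]
  rw [PySem.List.pyRange_one]
  rw [show ((kl.length : Int) + 1 - 0).toNat = kl.length + 1 from by omega]
  rw [loopB c (kl.length + 1) 0 PySem.Set.empty
        (if c ≤ (kl.length : Int) then [("", kl)] else [])]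
  rw [← annF_zero c kl]
  have h2 := collectB_annF kl c (kl.length + 1) 0
  rw [Nat.cast_zero] at h2
  rw [h2]
  congr 1
  apply List.flatMap_congr
  intro r _
  rw [Nat.zero_add]

theorem slice_to_of_le (xs : List Char) (b : Int) (h : (xs.length : Int) ≤ b) :
    PySem.List.slice xs none (some b) = xs := by
  have hb : 0 ≤ b := le_trans (by positivity) h
  rw [PySem.List.slice_to xs hb]
  exact List.take_of_length_le (by omega)

theorem length_slice_to (xs : List Char) (b : Int) :
    ((PySem.List.slice xs none (some b)).length : Int) =
      if 0 ≤ b then min (xs.length : Int) b else max ((xs.length : Int) + b) 0 := by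
  by_cases hb : 0 ≤ b
  · rw [PySem.List.slice_to xs hb, if_pos hb]
    simp [List.length_take]
    omega
  · rw [if_neg hb]
    have hk : b = -(((-b).toNat : Nat) : Int) := by omega
    have hkpos : 0 < (-b).toNat := by omega
    rw [hk, PySem.List.slice_to_neg_natCast xs (-b).toNat hkpos]
    simp [List.length_take]
    omega

-- ===== VERDICT (by name: the statement is the Claim_ definition above) =====
theorem delete_edits_prefix_spec : Claim_equal_delete_edits_prefix := by
  intro key med pl ml _ hpre
  unfold Spec_delete_edits_prefix
  have hkl : (if ((key.toList.length : Int)) > pl then PySem.List.slice key.toList none (some pl) else key.toList)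
      = PySem.List.slice key.toList none (some pl) := by
    split_ifs with h
    · rfl
    · exact (slice_to_of_le key.toList pl (by omega)).symm
  have hpre' : med ≤ ((PySem.List.slice key.toList none (some pl)).length : Int) ∨ 0 ≤ ml := by
    rw [length_slice_to]
    rwa [Pre_delete_edits_prefix, pvTruncLen] at hpre
  simp only [delete_edits_prefix, delete_edits_prefix_alt, hkl]
  exact main_eq _ med ml hpre'

theorem delete_edits_prefix_raises : Claim_raises_delete_edits_prefix := by
  unfold Claim_raises_delete_edits_prefix
  refine ⟨?_, by decide⟩
  intro key med pl ml _ hr hpre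
  rw [Raises_delete_edits_prefix] at hr
  rw [Pre_delete_edits_prefix] at hpre
  omega

-- self-check: the recorded raise witness indeed lies in the Raises_ region (projection of the theorem above)
theorem pvRaiseWitness_ok : Raises_delete_edits_prefix "ab" 5 10 (-2) :=
  delete_edits_prefix_raises.2.2.1
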